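-- pv_equiv track=rewrite | github.com/dexter2206/ising | ising/core.py | max_chunk_size
-- ===== SOURCE A (Python) =====
-- def max_chunk_size(mem_bytes):
--     """Determine maximum chunk size for use with given ammount of memory.
--
--     :param mem_bytes: size of available memory in bytes. This might mean different things
--      depending on for what computation method the chunk_size is being computed but the
--      bottom line is: this is the ammount of memory that we are able to use
--     :type mem_bytes: int
--     :returns: maximum chunk size as a exponent determining part of search spaced sweep
--      during a single iteration. More precisely, if the returned value is `m` then
--      2 ** `m` states can be searched during a single pass of the algorithm (and this is
--      a maximal such exponent `m` that can be used).
--     :rtype: int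
--     """
--     elements_max = mem_bytes // 16 // 2
--     chunk_size = 0
--     while elements_max > 1:
--         elements_max >>= 1
--         chunk_size += 1
--     if 2 * 16 * 2 ** chunk_size + 1024 * 1024 * 1024 > mem_bytes:
--         chunk_size -= 1
--     return chunk_size
-- ===== SOURCE B (Python) =====
-- def max_chunk_size(mem_bytes):
--     """Closed-form re-implementation: bit_length replaces the halving loop."""
--     elements_max = mem_bytes // 16 // 2
--     chunk_size = elements_max.bit_length() - 1 if elements_max > 1 else 0
--     if 2 * 16 * 2 ** chunk_size + 1024 * 1024 * 1024 > mem_bytes: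
--         chunk_size -= 1
--     return chunk_size
-- ===== Notes on version B (the rewrite author's own statement) =====
-- stated objective: idiomatic
-- what changed: The halving while-loop computing the floor log2 of elements_max is replaced by the closed form using the bit_length builtin (guarded to zero for small elements_max), keeping the final memory-threshold adjustment.
import Mathlib
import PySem

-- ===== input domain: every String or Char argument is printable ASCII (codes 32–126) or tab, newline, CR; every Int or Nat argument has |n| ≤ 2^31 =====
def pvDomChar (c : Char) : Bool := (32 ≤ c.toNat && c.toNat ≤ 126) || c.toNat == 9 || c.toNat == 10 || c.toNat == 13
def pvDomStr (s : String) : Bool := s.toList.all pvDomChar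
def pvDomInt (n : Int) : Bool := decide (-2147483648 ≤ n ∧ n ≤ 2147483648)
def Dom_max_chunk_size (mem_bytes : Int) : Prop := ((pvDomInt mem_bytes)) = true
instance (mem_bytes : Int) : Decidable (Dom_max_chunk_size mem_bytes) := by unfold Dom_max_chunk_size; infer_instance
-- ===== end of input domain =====

-- B replaces A's halving while-loop by the closed form bit_length() - 1 (idiomatic).

-- ===== PORT A =====
-- the 'while elements_max > 1: elements_max >>= 1; chunk_size += 1' loop
def pvLoopA (e c : Int) : Int :=
  if 1 < e then pvLoopA (PySem.Int.floordiv e 2) (c + 1) else c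
termination_by e.toNat
decreasing_by
  have h2 : PySem.Int.floordiv e 2 = e / 2 :=
    PySem.Int.floordiv_eq_ediv_of_pos (by omega)
  rw [h2]; omega

def max_chunk_size (mem_bytes : Int) : Int :=
  let elements_max := PySem.Int.floordiv (PySem.Int.floordiv mem_bytes 16) 2
  let chunk_size := pvLoopA elements_max 0
  -- chunk_size ≥ 0 here, so Python's 2 ** chunk_size is the integer power below
  let chunk_size :=
    if 2 * 16 * (2 : Int) ^ chunk_size.toNat + 1024 * 1024 * 1024 > mem_bytes
    then chunk_size - 1 else chunk_size
  chunk_size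

-- ===== PORT B =====
def max_chunk_size_alt (mem_bytes : Int) : Int :=
  let elements_max := PySem.Int.floordiv (PySem.Int.floordiv mem_bytes 16) 2
  let chunk_size :=
    if 1 < elements_max then (PySem.Int.bitLength elements_max : Int) - 1 else 0
  let chunk_size :=
    if 2 * 16 * (2 : Int) ^ chunk_size.toNat + 1024 * 1024 * 1024 > mem_bytes
    then chunk_size - 1 else chunk_size
  chunk_size

-- ===== PRECONDITION & SPEC =====
def Spec_max_chunk_size (mem_bytes : Int) (out : Int) : Prop := out = max_chunk_size_alt mem_bytes
instance (mem_bytes : Int) (out : Int) : Decidable (Spec_max_chunk_size mem_bytes out) := by unfold Spec_max_chunk_size; infer_instance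

-- ===== CLAIM (what is proved, stated in full; the proofs are below) =====
def Claim_equal_max_chunk_size : Prop := ∀ (mem_bytes : Int), Dom_max_chunk_size mem_bytes → Spec_max_chunk_size mem_bytes (max_chunk_size mem_bytes)

-- ===== LEMMAS AND PROOFS =====

-- the halving loop computes bit_length - 1 on positive inputs
lemma pvLoopA_eq_bitLength : ∀ (n : Nat) (e c : Int), e.toNat ≤ n → 0 < e →
    pvLoopA e c = c + (PySem.Int.bitLength e : Int) - 1 := by
  intro n
  induction n with
  | zero => intro e c hle hpos; omega
  | succ n ih =>
    intro e c hle hpos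
    rw [pvLoopA]
    by_cases h1 : 1 < e
    · have hf : PySem.Int.floordiv e 2 = e / 2 :=
        PySem.Int.floordiv_eq_ediv_of_pos (by omega)
      rw [if_pos h1, ih _ _ (by rw [hf]; omega) (by rw [hf]; omega)]
      rw [PySem.Int.bitLength_of_pos (by omega : (0:Int) < e)]
      push_cast; ring
    · have he : e = 1 := by omega
      subst he
      have hb : PySem.Int.bitLength (1:Int) = 1 := by decide
      rw [if_neg h1, hb]; ring

lemma pvLoopA_eq_closed (e : Int) :
    pvLoopA e 0 = if 1 < e then (PySem.Int.bitLength e : Int) - 1 else 0 := by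
  by_cases h1 : 1 < e
  · rw [if_pos h1, pvLoopA_eq_bitLength e.toNat e 0 le_rfl (by omega)]; ring
  · rw [if_neg h1, pvLoopA, if_neg h1]

-- ===== VERDICT (by name: the statement is the Claim_ definition above) =====
theorem max_chunk_size_spec : Claim_equal_max_chunk_size := by
  intro mem_bytes _
  unfold Spec_max_chunk_size
  simp only [max_chunk_size, max_chunk_size_alt, pvLoopA_eq_closed]
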